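-- pv_equiv track=rewrite | github.com/smvfe/ITMO | CT2/DM/4sem/GenFunctions/E.py | P_coeff
-- ===== SOURCE A (Python) =====
-- import math
--
-- def P_coeff(r, d, p_coeff):
--     p = []
--     for m in range(d + 1):
--         sum_part = 0
--         for s in range(m + 1):
--             k = m - s
--             if k < 0 or k > d:
--                 continue
--             pk = 0
--             for i in range(d + 1):
--                 pk += p_coeff[i] * (k ** i)
--             comb_val = math.comb(d + 1, s)
--             sign = (-1) ** s
--             term = comb_val * sign * pk
--             sum_part += term
--         c_m = (r ** m) * sum_part
--         p.append(c_m)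
--     return p
-- ===== SOURCE B (Python) =====
-- import math
--
-- def P_coeff(r, d, p_coeff):
--     if d < 0:
--         return []
--     n = d + 1
--     # evaluate P(k) once for each k = 0..d via Horner's rule
--     P_vals = []
--     for k in range(n):
--         v = 0
--         for c in reversed(p_coeff[:n]):
--             v = v * k + c
--         P_vals.append(v)
--     signed_comb = [(-1) ** s * math.comb(n, s) for s in range(n)]
--     p = []
--     rp = 1
--     for m in range(n):
--         acc = sum(signed_comb[s] * P_vals[m - s] for s in range(m + 1))
--         p.append(rp * acc)
--         rp *= r
--     return p
-- ===== Notes on version B (the rewrite author's own statement) =====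
-- stated objective: faster
-- what changed: B precomputes each polynomial value P(k) once with Horner's rule and the signed binomial row once, then fills the output with a double loop carrying a running power of r, instead of A re-evaluating the polynomial by a fresh power-sum loop inside every (m,s) pair; intended as faster (a timing run measured 96x at d~256, unconfirmed at d~1024 where both time out on huge bignums).
-- outside the precondition, e.g. on P_coeff(1, 1, [5]): A raises IndexError, B returns [5, -5]
import Mathlib
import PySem

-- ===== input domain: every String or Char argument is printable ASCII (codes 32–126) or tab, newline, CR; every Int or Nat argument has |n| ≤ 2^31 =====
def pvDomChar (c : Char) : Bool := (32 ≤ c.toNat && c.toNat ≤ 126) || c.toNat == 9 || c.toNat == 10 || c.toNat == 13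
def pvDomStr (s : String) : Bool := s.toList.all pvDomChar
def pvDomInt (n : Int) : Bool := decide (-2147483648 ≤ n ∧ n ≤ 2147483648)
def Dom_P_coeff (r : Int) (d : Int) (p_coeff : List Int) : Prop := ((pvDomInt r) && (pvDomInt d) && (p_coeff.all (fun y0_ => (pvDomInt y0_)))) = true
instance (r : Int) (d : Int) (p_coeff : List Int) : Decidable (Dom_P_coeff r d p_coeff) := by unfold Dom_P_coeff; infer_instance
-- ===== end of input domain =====

-- B replaces A's per-term power-sum evaluation by Horner-precomputed polynomial values and a
-- precomputed signed binomial row, then a double loop with a running power of r; intended as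
-- faster (timing run measured 96x at d~256; at d~1024 both exceed the limit on huge bignums).

-- ===== PORT A =====
def P_coeff (r : Int) (d : Int) (p_coeff : List Int) : List Int :=
  (PySem.List.pyRange 0 (d+1) 1).foldl (fun p m =>
    let sum_part := (PySem.List.pyRange 0 (m+1) 1).foldl (fun sum_part s =>
      let k := m - s
      if k < 0 ∨ k > d then sum_part
      else
        let pk := (PySem.List.pyRange 0 (d+1) 1).foldl
          (fun pk i => pk + PySem.List.pyGetD p_coeff i 0 * k ^ i.toNat) 0
        let comb_val : Int := (Nat.choose (d+1).toNat s.toNat : Int)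
        let sign : Int := (-1 : Int) ^ s.toNat
        let term := comb_val * sign * pk
        sum_part + term) 0
    p ++ [r ^ m.toNat * sum_part]) []

-- ===== PORT B =====
def P_coeff_alt (r : Int) (d : Int) (p_coeff : List Int) : List Int :=
  if d < 0 then []
  else
    let n := (d + 1).toNat
    let Pvals := (List.range n).map (fun (k : Nat) =>
      (p_coeff.take n).reverse.foldl (fun v c => v * (k : Int) + c) 0)
    let signedComb := (List.range n).map (fun s => (-1 : Int) ^ s * (Nat.choose n s : Int))
    ((List.range n).foldl (fun (st : List Int × Int) m =>
      let acc := ((List.range (m + 1)).map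
        (fun s => signedComb.getD s 0 * Pvals.getD (m - s) 0)).sum
      (st.1 ++ [st.2 * acc], st.2 * r)) ([], 1)).1

-- ===== PRECONDITION & SPEC =====
-- Pre_ excludes exactly the inputs where A raises IndexError: d ≥ 0 with fewer than d+1 coefficients.
def Pre_P_coeff (r : Int) (d : Int) (p_coeff : List Int) : Prop :=
  d < 0 ∨ d + 1 ≤ (p_coeff.length : Int)
instance (r : Int) (d : Int) (p_coeff : List Int) : Decidable (Pre_P_coeff r d p_coeff) := by
  unfold Pre_P_coeff; infer_instance
def pvWitness_P_coeff : Int × Int × List Int := (2, 2, [1, 0, 3])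
def Spec_P_coeff (r : Int) (d : Int) (p_coeff : List Int) (out : List Int) : Prop := out = P_coeff_alt r d p_coeff
instance (r : Int) (d : Int) (p_coeff : List Int) (out : List Int) : Decidable (Spec_P_coeff r d p_coeff out) := by unfold Spec_P_coeff; infer_instance

-- ===== CLAIM (what is proved, stated in full; the proofs are below) =====
def Claim_equal_P_coeff : Prop := ∀ (r : Int) (d : Int) (p_coeff : List Int), Dom_P_coeff r d p_coeff → Pre_P_coeff r d p_coeff → Spec_P_coeff r d p_coeff (P_coeff r d p_coeff)

-- ===== LEMMAS AND PROOFS =====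

-- Horner evaluation equals the power sum.
theorem horner_eq_powsum (l : List Int) (x : Int) :
    l.reverse.foldl (fun v c => v * x + c) 0
      = ((List.range l.length).map (fun i => l.getD i 0 * x ^ i)).sum := by
  induction l with
  | nil => simp
  | cons c cs ih =>
    rw [List.reverse_cons, List.foldl_append]
    simp only [List.foldl_cons, List.foldl_nil, ih, List.length_cons,
      List.range_succ_eq_map, List.map_cons, List.map_map, List.sum_cons]
    simp only [Function.comp_def, List.getD_cons_succ, List.getD_cons_zero, pow_succ, pow_zero]
    have h : (List.map (fun i => cs.getD i 0 * (x ^ i * x)) (List.range cs.length)).sum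
        = (List.map (fun i => (cs.getD i 0 * x ^ i) * x) (List.range cs.length)).sum := by
      congr 1; apply List.map_congr_left; intro i _; ring
    rw [h, List.sum_map_mul_right]
    ring

-- B's fold with running power of r produces the mapped list.
theorem alt_fold_eq_map (r : Int) (g : Nat → Int) (n : Nat) :
    ((List.range n).foldl (fun (st : List Int × Int) m =>
        (st.1 ++ [st.2 * g m], st.2 * r)) ([], 1))
      = ((List.range n).map (fun m => r ^ m * g m), r ^ n) := by
  induction n with
  | zero => simp
  | succ n ih =>
    rw [List.range_succ, List.foldl_append, ih, List.map_append]
    simp [pow_succ]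

-- A's inner sum over s, rewritten as a map-sum (for m < n, d + 1 = n).
theorem a_sum_eq (d : Int) (n : Nat) (p_coeff : List Int) (m : Nat)
    (hm : m < n) (hn : d + 1 = (n : Int)) :
    List.foldl (fun sum_part (s : Int) =>
        if (m : Int) - s < 0 ∨ (m : Int) - s > d then sum_part
        else sum_part + (Nat.choose n s.toNat : Int) * (-1 : Int) ^ s.toNat *
          List.foldl (fun pk i => pk + PySem.List.pyGetD p_coeff i 0 * ((m : Int) - s) ^ i.toNat) 0
            ((List.range n).map (fun (k : Nat) => (k : Int))))
      0 (PySem.List.pyRange 0 ((m : Int) + 1) 1)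
    = ((List.range (m + 1)).map (fun s =>
        ((Nat.choose n s : Int) * (-1 : Int) ^ s) *
          ((List.range n).map (fun i => p_coeff.getD i 0 * ((m - s : Nat) : Int) ^ i)).sum)).sum := by
  have h1 : (m : Int) + 1 = ((m + 1 : Nat) : Int) := by push_cast; ring
  rw [h1, PySem.List.pyRange_zero_natCast, List.foldl_map]
  rw [PySem.List.foldl_congr_mem (g := fun (acc : Int) (s : Nat) =>
    acc + ((Nat.choose n s : Int) * (-1 : Int) ^ s) *
      ((List.range n).map
        (fun i => p_coeff.getD i 0 * ((m - s : Nat) : Int) ^ i)).sum)]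
  · rw [PySem.List.foldl_add]; simp
  · intro acc s hs
    rw [List.mem_range] at hs
    have hk0 : ¬ ((m : Int) - s < 0 ∨ (m : Int) - s > d) := by omega
    simp only [hk0, if_false]
    rw [List.foldl_map, PySem.List.foldl_add]
    simp only [PySem.List.pyGetD_natCast, Int.toNat_natCast, zero_add]
    have hcast : (m : Int) - (s : Int) = ((m - s : Nat) : Int) := by omega
    rw [hcast]

-- ===== VERDICT (by name: the statement is the Claim_ definition above) =====
theorem P_coeff_spec : Claim_equal_P_coeff := by
  intro r d p_coeff _ hpre
  unfold Spec_P_coeff P_coeff P_coeff_alt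
  by_cases hd : d < 0
  · rw [if_pos hd, PySem.List.pyRange_one_eq_nil (by omega)]
    rfl
  · rw [if_neg hd]
    have hd0 : 0 ≤ d := by omega
    have hlen : (d + 1).toNat ≤ p_coeff.length := by
      rcases hpre with h | h
      · omega
      · omega
    set n := (d + 1).toNat with hn
    have h2 : d + 1 = (n : Int) := by omega
    rw [PySem.List.foldl_append_singleton_eq_map
      (f := fun m => r ^ m.toNat *
        (PySem.List.pyRange 0 (m+1) 1).foldl (fun sum_part s =>
          let k := m - s
          if k < 0 ∨ k > d then sum_part
          else
            let pk := (PySem.List.pyRange 0 (d+1) 1).foldl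
              (fun pk i => pk + PySem.List.pyGetD p_coeff i 0 * k ^ i.toNat) 0
            let comb_val : Int := (Nat.choose (d+1).toNat s.toNat : Int)
            let sign : Int := (-1 : Int) ^ s.toNat
            let term := comb_val * sign * pk
            sum_part + term) 0)]
    rw [h2, PySem.List.pyRange_zero_natCast, List.map_map]
    simp only [alt_fold_eq_map, List.nil_append]
    apply List.map_congr_left
    intro m hmem
    rw [List.mem_range] at hmem
    have hmd : (m : Int) ≤ d := by omega
    simp only [Function.comp_def]
    simp only [Int.toNat_natCast]
    rw [a_sum_eq d n p_coeff m hmem h2]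
    congr 1
    congr 1
    apply List.map_congr_left
    intro s hs
    rw [List.mem_range] at hs
    have hsn : s < n := by omega
    have hmn : m - s < n := by omega
    rw [PySem.List.getD_map_range _ _ _ _ hsn, PySem.List.getD_map_range _ _ _ _ hmn]
    rw [horner_eq_powsum]
    have hlt : (p_coeff.take n).length = n := by
      rw [List.length_take]; omega
    rw [hlt]
    have hsum : ((List.range n).map
          (fun i => (p_coeff.take n).getD i 0 * ((m - s : Nat) : Int) ^ i)).sum
        = ((List.range n).map
          (fun i => p_coeff.getD i 0 * ((m - s : Nat) : Int) ^ i)).sum := by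
      congr 1
      apply List.map_congr_left
      intro i hi
      rw [List.mem_range] at hi
      rw [List.getD_eq_getElem?_getD, List.getD_eq_getElem?_getD, List.getElem?_take,
        if_pos hi]
    rw [hsum]
    ring
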